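-- pv_equiv track=rewrite | github.com/NiceAfternoon/arknights-mower | arknights_mower/agent/tools/analyze_missed_order.py | select_latest_run_order_before_log_time
-- ===== SOURCE A (Python) =====
-- from typing import Optional
--
-- def select_latest_run_order_before_log_time(
--     anchor_utc_time: int, run_orders: list[dict]
-- ) -> Optional[dict]:
--     eligible = [
--         item
--         for item in run_orders
--         if item.get("log_utc_time") is not None
--         and item["log_utc_time"] < anchor_utc_time
--     ]
--     if not eligible:
--         return None
--     eligible.sort(key=lambda item: (item["log_utc_time"] or 0, item["planned_at"]))
--     return eligible[-1]
-- ===== SOURCE B (Python) =====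
-- from typing import Optional
--
--
-- def select_latest_run_order_before_log_time(
--     anchor_utc_time: int, run_orders: list[dict]
-- ) -> Optional[dict]:
--     best = None  # (key, item) with key = (log_utc_time, planned_at)
--     for item in run_orders:
--         t = item.get("log_utc_time")
--         if t is None or t >= anchor_utc_time:
--             continue
--         key = (t, item["planned_at"])
--         if best is None or key >= best[0]:
--             best = (key, item)
--     return best[1] if best is not None else None
-- ===== Notes on version B (the rewrite author's own statement) =====
-- stated objective: alternative
-- what changed: Replaces filter-then-stable-sort-then-take-last with a single linear pass keeping the running maximum by the (log_utc_time, planned_at) key, replacing on ties so the last maximal eligible item wins exactly as taking the last element of the stable sort; Pre_ excludes only the inputs where both programs raise KeyError (an eligible item without a planned_at key).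
import Mathlib
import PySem

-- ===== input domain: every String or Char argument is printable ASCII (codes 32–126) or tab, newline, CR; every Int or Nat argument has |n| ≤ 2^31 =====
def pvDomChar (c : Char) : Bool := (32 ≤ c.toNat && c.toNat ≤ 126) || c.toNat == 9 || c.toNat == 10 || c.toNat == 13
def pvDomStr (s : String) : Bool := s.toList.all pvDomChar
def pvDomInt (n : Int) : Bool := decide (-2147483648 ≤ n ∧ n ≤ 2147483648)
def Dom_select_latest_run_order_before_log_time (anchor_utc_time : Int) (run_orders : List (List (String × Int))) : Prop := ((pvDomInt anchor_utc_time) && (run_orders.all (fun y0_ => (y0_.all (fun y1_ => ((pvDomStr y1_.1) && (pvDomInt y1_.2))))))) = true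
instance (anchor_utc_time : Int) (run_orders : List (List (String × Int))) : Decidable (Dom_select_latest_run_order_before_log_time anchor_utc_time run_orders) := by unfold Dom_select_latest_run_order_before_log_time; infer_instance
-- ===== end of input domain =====

-- B replaces A's filter + stable sort + last element by a single linear pass that keeps the
-- running maximum by the lexicographic key (log_utc_time, planned_at), replacing on ties
-- (so the last maximal eligible item wins, exactly as taking the last element of a stable sort).


-- ===== PORT A =====
-- dict lookup (first match in the association list): item.get(k) / item[k]
def pvGetKey? (item : List (String × Int)) (k : String) : Option Int :=
  (item.find? (fun p => p.1 == k)).map (·.2)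

-- the filter predicate: item.get("log_utc_time") is not None and item["log_utc_time"] < anchor
def pvEligibleA (anchor : Int) (item : List (String × Int)) : Bool :=
  match pvGetKey? item "log_utc_time" with
  | some t => decide (t < anchor)
  | none => false

-- sort key, first component: item["log_utc_time"] or 0  (lookup total under Pre_; `or 0` keeps the int)
def pvKey1A (item : List (String × Int)) : Int :=
  let v := (pvGetKey? item "log_utc_time").getD 0
  if v = 0 then 0 else v

-- sort key, second component: item["planned_at"]  (total form; Pre_ guarantees the key is present)
def pvKey2A (item : List (String × Int)) : Int :=
  (pvGetKey? item "planned_at").getD 0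

def select_latest_run_order_before_log_time (anchor_utc_time : Int) (run_orders : List (List (String × Int))) : Option (List (String × Int)) :=
  let eligible := run_orders.filter (pvEligibleA anchor_utc_time)
  if eligible = [] then none
  else PySem.List.pyGet? (PySem.List.sorted2 eligible pvKey1A pvKey2A) (-1)

-- ===== PORT B =====
-- one step of the linear pass: skip non-eligible items, else replace best when key >= best[0]
def pvStepB (anchor : Int) (best : Option ((Int × Int) × List (String × Int))) (item : List (String × Int)) : Option ((Int × Int) × List (String × Int)) :=
  match pvGetKey? item "log_utc_time" with
  | none => best
  | some t =>
    if t < anchor then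
      let key : Int × Int := (t, (pvGetKey? item "planned_at").getD 0)
      match best with
      | none => some (key, item)
      | some (bk, _) =>
        if bk.1 < key.1 ∨ (bk.1 = key.1 ∧ bk.2 ≤ key.2) then some (key, item) else best
    else best

def select_latest_run_order_before_log_time_alt (anchor_utc_time : Int) (run_orders : List (List (String × Int))) : Option (List (String × Int)) :=
  (run_orders.foldl (pvStepB anchor_utc_time) none).map (·.2)

-- ===== PRECONDITION & SPEC =====
-- Pre_ excludes exactly the inputs on which Python A raises KeyError: an eligible item
-- (log_utc_time present and < anchor) without a "planned_at" key (the sort key reads it).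
def Pre_select_latest_run_order_before_log_time (anchor_utc_time : Int) (run_orders : List (List (String × Int))) : Prop :=
  (run_orders.all (fun item =>
    match (item.find? (fun p => p.1 == "log_utc_time")).map (·.2) with
    | some t => !decide (t < anchor_utc_time) || (item.find? (fun p => p.1 == "planned_at")).isSome
    | none => true)) = true
instance (anchor_utc_time : Int) (run_orders : List (List (String × Int))) : Decidable (Pre_select_latest_run_order_before_log_time anchor_utc_time run_orders) := by unfold Pre_select_latest_run_order_before_log_time; infer_instance

def pvWitness_select_latest_run_order_before_log_time : Int × (List (List (String × Int))) :=
  (10, [[("log_utc_time", 3), ("planned_at", 5)], [("log_utc_time", 3), ("planned_at", 7)], [("planned_at", 1)]])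

def Spec_select_latest_run_order_before_log_time (anchor_utc_time : Int) (run_orders : List (List (String × Int))) (out : Option (List (String × Int))) : Prop := out = select_latest_run_order_before_log_time_alt anchor_utc_time run_orders
instance (anchor_utc_time : Int) (run_orders : List (List (String × Int))) (out : Option (List (String × Int))) : Decidable (Spec_select_latest_run_order_before_log_time anchor_utc_time run_orders out) := by unfold Spec_select_latest_run_order_before_log_time; infer_instance

-- ===== CLAIM (what is proved, stated in full; the proofs are below) =====
def Claim_equal_select_latest_run_order_before_log_time : Prop := ∀ (anchor_utc_time : Int) (run_orders : List (List (String × Int))), Dom_select_latest_run_order_before_log_time anchor_utc_time run_orders → Pre_select_latest_run_order_before_log_time anchor_utc_time run_orders → Spec_select_latest_run_order_before_log_time anchor_utc_time run_orders (select_latest_run_order_before_log_time anchor_utc_time run_orders)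

-- ===== LEMMAS AND PROOFS =====

-- the strict lexicographic "sort key less-than" exactly as PySem.List.sorted2 compares
def pvLt (a b : List (String × Int)) : Bool :=
  decide (pvKey1A a < pvKey1A b) || (!decide (pvKey1A b < pvKey1A a) && decide (pvKey2A a < pvKey2A b))

-- A's fold characterization: running maximum over the eligible list, replacing on ties
def pvStepA (b : Option (List (String × Int))) (x : List (String × Int)) : Option (List (String × Int)) :=
  match b with
  | none => some x
  | some bb => if pvLt x bb then b else some x

theorem pvLt_trans_not (x y b : List (String × Int)) (h1 : pvLt x y = true)
    (h2 : pvLt b y = false) : pvLt x b = true := by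
  simp only [pvLt, Bool.or_eq_true, Bool.and_eq_true, Bool.not_eq_true', decide_eq_true_eq,
    Bool.or_eq_false_iff, Bool.and_eq_false_iff, Bool.not_eq_false', decide_eq_false_iff_not] at *
  omega

theorem pvLt_trans (x y z : List (String × Int)) (h1 : pvLt x y = true)
    (h2 : pvLt y z = true) : pvLt x z = true := by
  simp only [pvLt, Bool.or_eq_true, Bool.and_eq_true, Bool.not_eq_true', decide_eq_true_eq,
    decide_eq_false_iff_not] at *
  omega

theorem pvLt_asymm (x y : List (String × Int)) (h : pvLt x y = true) : pvLt y x = false := by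
  simp only [pvLt, Bool.or_eq_true, Bool.and_eq_true, Bool.not_eq_true', decide_eq_true_eq,
    Bool.or_eq_false_iff, Bool.and_eq_false_iff, Bool.not_eq_false', decide_eq_false_iff_not] at *
  omega

theorem insertBy_ne_nil (x : List (String × Int)) (ys : List (List (String × Int))) :
    PySem.List.insertBy pvLt x ys ≠ [] := by
  cases ys with
  | nil => simp [PySem.List.insertBy]
  | cons y t =>
    simp only [PySem.List.insertBy]
    split <;> simp

theorem insertBy_pairwise (x : List (String × Int)) (ys : List (List (String × Int)))
    (h : ys.Pairwise (fun a b => pvLt b a = false)) :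
    (PySem.List.insertBy pvLt x ys).Pairwise (fun a b => pvLt b a = false) := by
  induction ys with
  | nil => simp [PySem.List.insertBy]
  | cons y t ih =>
    rcases h with _ | ⟨hy, ht⟩
    simp only [PySem.List.insertBy]
    split
    · rename_i hxy
      refine List.Pairwise.cons ?_ (List.Pairwise.cons hy ht)
      intro z hz
      rcases List.mem_cons.mp hz with rfl | hz
      · exact pvLt_asymm _ _ hxy
      · have hzy := hy z hz
        by_contra hzx
        have hzx' : pvLt z x = true := by simpa using hzx
        have hzy' := pvLt_trans z x y hzx' hxy
        simp [hzy] at hzy'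
    · rename_i hxy
      refine List.Pairwise.cons ?_ (ih ht)
      intro z hz
      rcases (PySem.List.mem_insertBy pvLt x z t).mp hz with rfl | hz
      · simpa using hxy
      · exact hy z hz

theorem insertBy_getLast (x : List (String × Int)) (ys : List (List (String × Int)))
    (h : ys.Pairwise (fun a b => pvLt b a = false)) :
    (PySem.List.insertBy pvLt x ys).getLast? =
      some (match ys.getLast? with
            | none => x
            | some b => if pvLt x b then b else x) := by
  induction ys with
  | nil => simp [PySem.List.insertBy]
  | cons y t ih =>
    rcases h with _ | ⟨hy, ht⟩
    simp only [PySem.List.insertBy]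
    split
    · rename_i hxy
      -- x goes first; last of y :: t stays, and pvLt x last = true
      cases hlast : (y :: t).getLast? with
      | none => simp at hlast
      | some b =>
        have hb : b ∈ y :: t := List.mem_of_getLast? hlast
        have hxb : pvLt x b = true := by
          rcases List.mem_cons.mp hb with rfl | hbt
          · exact hxy
          · exact pvLt_trans_not x y b hxy (hy b hbt)
        simp [List.getLast?_cons, hlast, hxb]
    · rename_i hxy
      have hxy' : pvLt x y = false := by simpa using hxy
      cases t with
      | nil =>
        simp [PySem.List.insertBy, hxy']
      | cons z zs =>
        have hne := insertBy_ne_nil x (z :: zs)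
        have : (y :: PySem.List.insertBy pvLt x (z :: zs)).getLast? =
            (PySem.List.insertBy pvLt x (z :: zs)).getLast? := by
          cases hc : PySem.List.insertBy pvLt x (z :: zs) with
          | nil => exact absurd hc hne
          | cons a l => simp [List.getLast?_cons]
        rw [this, ih ht]
        simp [List.getLast?_cons]

theorem foldl_insertBy_getLast (l : List (List (String × Int))) (acc : List (List (String × Int)))
    (h : acc.Pairwise (fun a b => pvLt b a = false)) :
    (l.foldl (fun a x => PySem.List.insertBy pvLt x a) acc).getLast? =
      l.foldl pvStepA acc.getLast? := by
  induction l generalizing acc with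
  | nil => rfl
  | cons x t ih =>
    have h' := insertBy_pairwise x acc h
    rw [List.foldl_cons, List.foldl_cons, ih _ h', insertBy_getLast x acc h]
    cases hlast : acc.getLast? with
    | none => rfl
    | some b =>
      simp only [pvStepA]
      split <;> rfl

-- A equals the running-maximum fold over the eligible list
theorem portA_eq_fold (anchor : Int) (ros : List (List (String × Int))) :
    select_latest_run_order_before_log_time anchor ros =
      (ros.filter (pvEligibleA anchor)).foldl pvStepA none := by
  unfold select_latest_run_order_before_log_time
  set elig := ros.filter (pvEligibleA anchor) with helig
  by_cases he : elig = []
  · simp [he]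
  · simp only [he]
    have hs : PySem.List.sorted2 elig pvKey1A pvKey2A =
        elig.foldl (fun a x => PySem.List.insertBy pvLt x a) [] := rfl
    rw [PySem.List.pyGet?_neg_one, hs,
      foldl_insertBy_getLast elig [] (by simp)]
    simp

-- the encoding of B's state from A's fold state
def pvEnc (b : Option (List (String × Int))) : Option ((Int × Int) × List (String × Int)) :=
  b.map (fun it => (((pvGetKey? it "log_utc_time").getD 0, (pvGetKey? it "planned_at").getD 0), it))

theorem key1_of_eligible (it : List (String × Int)) (t : Int)
    (ht : pvGetKey? it "log_utc_time" = some t) : pvKey1A it = t := by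
  simp only [pvKey1A, ht, Option.getD_some]
  split <;> omega

theorem stepB_enc (anchor : Int) (b : Option (List (String × Int))) (x : List (String × Int))
    (hb : ∀ it, b = some it → pvEligibleA anchor it = true) :
    pvStepB anchor (pvEnc b) x =
      pvEnc (if pvEligibleA anchor x then pvStepA b x else b) := by
  unfold pvStepB pvEligibleA
  cases hx : pvGetKey? x "log_utc_time" with
  | none => simp
  | some t =>
    by_cases hta : t < anchor
    · simp only [hta, decide_true]
      cases b with
      | none => simp [pvEnc, pvStepA, hx]
      | some bb =>
        have hbe : pvEligibleA anchor bb = true := hb bb rfl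
        unfold pvEligibleA at hbe
        cases hbb : pvGetKey? bb "log_utc_time" with
        | none => simp [hbb] at hbe
        | some tb =>
          have hk1x : pvKey1A x = t := key1_of_eligible x t hx
          have hk1b : pvKey1A bb = tb := key1_of_eligible bb tb hbb
          simp only [pvEnc, Option.map_some, pvStepA, if_true]
          have hlt : pvLt x bb = (decide (t < tb) || (!decide (tb < t) && decide (pvKey2A x < pvKey2A bb))) := by
            simp [pvLt, hk1x, hk1b]
          by_cases hcond : tb < t ∨ (tb = t ∧ (pvGetKey? bb "planned_at").getD 0 ≤ (pvGetKey? x "planned_at").getD 0)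
          · have hltf : pvLt x bb = false := by
              rw [hlt]
              simp only [Bool.or_eq_false_iff, Bool.and_eq_false_iff, Bool.not_eq_false',
                decide_eq_false_iff_not, decide_eq_true_eq]
              unfold pvKey2A
              omega
            simp [hbb, hx, hcond, hltf]
          · have hltt : pvLt x bb = true := by
              rw [hlt]
              simp only [Bool.or_eq_true, Bool.and_eq_true, Bool.not_eq_true',
                decide_eq_false_iff_not, decide_eq_true_eq]
              unfold pvKey2A
              omega
            simp [hbb, hcond, hltt]
    · simp [hta, pvEnc]

theorem foldl_B_enc (anchor : Int) (l : List (List (String × Int))) (b : Option (List (String × Int)))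
    (hb : ∀ it, b = some it → pvEligibleA anchor it = true) :
    l.foldl (pvStepB anchor) (pvEnc b) =
      pvEnc (l.foldl (fun a x => if pvEligibleA anchor x then pvStepA a x else a) b) := by
  induction l generalizing b with
  | nil => rfl
  | cons x t ih =>
    rw [List.foldl_cons, List.foldl_cons, stepB_enc anchor b x hb]
    apply ih
    intro it hit
    by_cases hex : pvEligibleA anchor x = true
    · simp only [hex, if_true] at hit
      cases b with
      | none => simp [pvStepA] at hit; subst hit; exact hex
      | some bb =>
        simp only [pvStepA] at hit
        split at hit
        · exact hb it hit
        · cases hit; exact hex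
    · simp only [Bool.not_eq_true] at hex
      simp only [hex, Bool.false_eq_true, if_false] at hit
      exact hb it hit

-- ===== VERDICT (by name: the statement is the Claim_ definition above) =====
theorem select_latest_run_order_before_log_time_spec : Claim_equal_select_latest_run_order_before_log_time := by
  intro anchor ros _ _
  unfold Spec_select_latest_run_order_before_log_time
  rw [portA_eq_fold]
  unfold select_latest_run_order_before_log_time_alt
  have h0 : (none : Option ((Int × Int) × List (String × Int))) = pvEnc none := rfl
  rw [h0, foldl_B_enc anchor ros none (by intro it h; cases h)]
  rw [← List.foldl_filter]
  cases (ros.filter (pvEligibleA anchor)).foldl pvStepA none <;> rfl
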